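-- pv_equiv track=rewrite | github.com/shao3d/Experts_panel | backend/src/services/reddit_enhanced_service.py | _select_soft_target_subreddits
-- ===== SOURCE A (Python) =====
-- from typing import Optional, List, Dict, Any, Set
--
-- POPULAR_SUBREDDITS = [
--     "AskReddit",
--     "explainlikeimfive",
--     "NoStupidQuestions",
--     "LifeProTips",
--     "personalfinance",
--     "investing",
-- ]
--
-- def _select_soft_target_subreddits(
--
--     suggested_subreddits: List[str],
--     anchor_terms: List[str],
--     query_terms: List[str],
--     limit: int = 2,
-- ) -> List[str]:
--     """Pick a tiny set of high-signal subreddit hints without returning to strict mode."""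
--     if not suggested_subreddits:
--         return []
--
--     ranked: List[Any] = []
--     anchor_set = {term.lower() for term in anchor_terms}
--     query_set = {term.lower() for term in query_terms}
--
--     for idx, subreddit in enumerate(suggested_subreddits):
--         cleaned = subreddit.strip()
--         lowered = cleaned.lower()
--         if not cleaned:
--             continue
--
--         score = 0
--         if lowered in anchor_set:
--             score += 5
--         if lowered in query_set:
--             score += 3
--         if lowered not in {s.lower() for s in POPULAR_SUBREDDITS}:
--             score += 1
--         if len(cleaned) <= 16:
--             score += 1
--
--         ranked.append((score, idx, cleaned))
--
--     ranked.sort(key=lambda item: (-item[0], item[1]))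
--     return [subreddit for _, _, subreddit in ranked[:limit]]
-- ===== SOURCE B (Python) =====
-- from typing import List
--
-- POPULAR_SUBREDDITS = [
--     "AskReddit",
--     "explainlikeimfive",
--     "NoStupidQuestions",
--     "LifeProTips",
--     "personalfinance",
--     "investing",
-- ]
--
--
-- def _select_soft_target_subreddits(
--     suggested_subreddits: List[str],
--     anchor_terms: List[str],
--     query_terms: List[str],
--     limit: int = 2,
-- ) -> List[str]:
--     """Bucket candidates by their (bounded) score instead of sorting them."""
--     if not suggested_subreddits:
--         return []
--
--     anchor_set = {term.lower() for term in anchor_terms}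
--     query_set = {term.lower() for term in query_terms}
--     popular = {s.lower() for s in POPULAR_SUBREDDITS}
--
--     scored = []
--     for subreddit in suggested_subreddits:
--         cleaned = subreddit.strip()
--         if not cleaned:
--             continue
--         lowered = cleaned.lower()
--         scored.append((
--             (5 if lowered in anchor_set else 0)
--             + (3 if lowered in query_set else 0)
--             + (lowered not in popular)
--             + (len(cleaned) <= 16),
--             cleaned,
--         ))
--
--     # scores lie in 0..10; emitting buckets from high to low reproduces the
--     # stable (-score, index) order without sorting
--     ordered = [name for want in range(10, -1, -1) for score, name in scored if score == want]
--     return ordered[:limit]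
-- ===== Notes on version B (the rewrite author's own statement) =====
-- stated objective: faster
-- what changed: B drops the (-score, index) sort entirely: scores are bounded in 0..10, so it emits the stable score buckets from 10 down to 0 (11 filter passes) and slices, reproducing A's sort order without sorting (O(n) selection instead of O(n log n) sort).
import Mathlib
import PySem

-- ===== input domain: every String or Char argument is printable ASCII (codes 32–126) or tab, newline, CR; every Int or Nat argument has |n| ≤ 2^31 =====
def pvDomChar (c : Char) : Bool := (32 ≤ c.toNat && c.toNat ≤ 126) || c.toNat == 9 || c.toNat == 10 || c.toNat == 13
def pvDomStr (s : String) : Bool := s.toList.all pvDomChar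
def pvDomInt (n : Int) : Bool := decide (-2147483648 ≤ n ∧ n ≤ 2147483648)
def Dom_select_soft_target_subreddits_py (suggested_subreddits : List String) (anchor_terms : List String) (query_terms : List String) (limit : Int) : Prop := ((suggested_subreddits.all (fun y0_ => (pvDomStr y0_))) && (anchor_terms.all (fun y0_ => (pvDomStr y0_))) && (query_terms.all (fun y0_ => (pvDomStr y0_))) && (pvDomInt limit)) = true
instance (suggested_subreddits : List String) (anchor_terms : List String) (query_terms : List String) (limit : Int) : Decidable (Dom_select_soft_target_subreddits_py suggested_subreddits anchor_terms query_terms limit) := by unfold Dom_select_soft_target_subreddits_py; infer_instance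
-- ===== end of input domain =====

-- B replaces A's full sort of the scored candidates by emitting the (bounded, 0..10) score
-- buckets from high to low — an alternative selection strategy, no sort; return values proved equal.


-- module constant POPULAR_SUBREDDITS (shared by both Pythons)
def pvPOPULAR_SUBREDDITS : List String :=
  ["AskReddit", "explainlikeimfive", "NoStupidQuestions", "LifeProTips", "personalfinance", "investing"]

-- ===== PORT A =====
def select_soft_target_subreddits_py (suggested_subreddits : List String) (anchor_terms : List String) (query_terms : List String) (limit : Int) : List String :=
  if suggested_subreddits = [] then []
  else
    let anchor_set : PySem.Set String := PySem.Set.ofList (anchor_terms.map PySem.Str.lower)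
    let query_set : PySem.Set String := PySem.Set.ofList (query_terms.map PySem.Str.lower)
    let ranked : List (Int × Int × String) :=
      (PySem.List.enumerate suggested_subreddits 0).foldl (fun ranked p =>
        let cleaned := PySem.Str.strip p.2
        let lowered := PySem.Str.lower cleaned
        if cleaned.toList = [] then ranked
        else
          let score : Int := 0
          let score := if anchor_set.contains lowered then score + 5 else score
          let score := if query_set.contains lowered then score + 3 else score
          let score := if !(PySem.Set.ofList (pvPOPULAR_SUBREDDITS.map PySem.Str.lower)).contains lowered then score + 1 else score
          let score := if PySem.Str.len cleaned ≤ 16 then score + 1 else score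
          ranked ++ [(score, p.1, cleaned)]) []
    let ranked := PySem.List.sorted2 ranked (fun item => -item.1) (fun item => item.2.1) false
    (PySem.List.slice ranked none (some limit)).map (fun t => t.2.2)

-- ===== PORT B =====
def select_soft_target_subreddits_py_alt (suggested_subreddits : List String) (anchor_terms : List String) (query_terms : List String) (limit : Int) : List String :=
  if suggested_subreddits = [] then []
  else
    let anchor_set : PySem.Set String := PySem.Set.ofList (anchor_terms.map PySem.Str.lower)
    let query_set : PySem.Set String := PySem.Set.ofList (query_terms.map PySem.Str.lower)
    let popular : PySem.Set String := PySem.Set.ofList (pvPOPULAR_SUBREDDITS.map PySem.Str.lower)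
    let scored : List (Int × String) :=
      suggested_subreddits.foldl (fun scored subreddit =>
        let cleaned := PySem.Str.strip subreddit
        if cleaned.toList = [] then scored
        else
          let lowered := PySem.Str.lower cleaned
          scored ++ [((if anchor_set.contains lowered then (5 : Int) else 0)
                      + (if query_set.contains lowered then (3 : Int) else 0)
                      + (if !popular.contains lowered then (1 : Int) else 0)
                      + (if PySem.Str.len cleaned ≤ 16 then (1 : Int) else 0), cleaned)]) []
    let ordered : List String :=
      (PySem.List.pyRange 10 (-1) (-1)).foldl (fun ordered want =>
        ordered ++ (scored.filter (fun t => t.1 == want)).map (fun t => t.2)) []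
    PySem.List.slice ordered none (some limit)

-- ===== PRECONDITION & SPEC =====
def Spec_select_soft_target_subreddits_py (suggested_subreddits : List String) (anchor_terms : List String) (query_terms : List String) (limit : Int) (out : List String) : Prop := out = select_soft_target_subreddits_py_alt suggested_subreddits anchor_terms query_terms limit
instance (suggested_subreddits : List String) (anchor_terms : List String) (query_terms : List String) (limit : Int) (out : List String) : Decidable (Spec_select_soft_target_subreddits_py suggested_subreddits anchor_terms query_terms limit out) := by unfold Spec_select_soft_target_subreddits_py; infer_instance

-- ===== CLAIM (what is proved, stated in full; the proofs are below) =====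
def Claim_equal_select_soft_target_subreddits_py : Prop := ∀ (suggested_subreddits : List String) (anchor_terms : List String) (query_terms : List String) (limit : Int), Dom_select_soft_target_subreddits_py suggested_subreddits anchor_terms query_terms limit → Spec_select_soft_target_subreddits_py suggested_subreddits anchor_terms query_terms limit (select_soft_target_subreddits_py suggested_subreddits anchor_terms query_terms limit)

-- ===== LEMMAS AND PROOFS =====

-- the score both programs assign to a non-empty cleaned candidate
def pvSc (aset qset : PySem.Set String) (cleaned : String) : Int :=
  (if aset.contains (PySem.Str.lower cleaned) then (5 : Int) else 0)
  + (if qset.contains (PySem.Str.lower cleaned) then (3 : Int) else 0)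
  + (if !(PySem.Set.ofList (pvPOPULAR_SUBREDDITS.map PySem.Str.lower)).contains (PySem.Str.lower cleaned) then (1 : Int) else 0)
  + (if PySem.Str.len cleaned ≤ 16 then (1 : Int) else 0)

def pvTrip (aset qset : PySem.Set String) (p : Int × String) : Int × Int × String :=
  (pvSc aset qset (PySem.Str.strip p.2), p.1, PySem.Str.strip p.2)

-- A's ranked list, in closed form
def pvRanked (aset qset : PySem.Set String) (sug : List String) : List (Int × Int × String) :=
  ((PySem.List.enumerate sug 0).filter (fun p => decide ((PySem.Str.strip p.2).toList ≠ []))).map (pvTrip aset qset)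

def pvWs : List Int := [10, 9, 8, 7, 6, 5, 4, 3, 2, 1, 0]

-- map commutes with a Python slice
lemma pv_map_slice {α β : Type} (f : α → β) (xs : List α) (a? b? : Option Int) :
    (PySem.List.slice xs a? b?).map f = PySem.List.slice (xs.map f) a? b? := by
  simp [PySem.List.slice, List.map_take, List.map_drop]

-- sorted2 with two Int keys is sorted with the lexicographic key
lemma pv_sorted2_eq_sorted_lex {α : Type} (xs : List α) (k1 k2 : α → Int) :
    PySem.List.sorted2 xs k1 k2 false
      = PySem.List.sorted xs (fun x => toLex (k1 x, k2 x)) false := by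
  have hfun : (fun a b => decide (k1 a < k1 b) || (!decide (k1 b < k1 a) && decide (k2 a < k2 b)))
      = (fun (a b : α) => decide (toLex (k1 a, k2 a) < toLex (k1 b, k2 b))) := by
    funext a b
    rw [Bool.eq_iff_iff]
    simp only [Bool.or_eq_true, Bool.and_eq_true, Bool.not_eq_true', decide_eq_true_iff,
      decide_eq_false_iff_not, Prod.Lex.lt_iff, ofLex_toLex]
    omega
  rw [PySem.List.sorted_eq_foldl_insertBy]
  simp only [PySem.List.sorted2, Bool.false_eq_true, if_false, hfun]

-- concatenating the filters over a covering list of distinct keys is a permutation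
lemma pv_perm_flatMap_filter {α κ : Type} [DecidableEq κ] (key : α → κ) :
    ∀ (ws : List κ) (l : List α), ws.Nodup → (∀ a ∈ l, key a ∈ ws) →
      (ws.flatMap (fun w => l.filter (fun a => key a == w))).Perm l := by
  intro ws
  induction ws with
  | nil =>
      intro l _ hcov
      have : l = [] := by
        cases l with
        | nil => rfl
        | cons x t => exact absurd (hcov x (by simp)) (by simp)
      simp [this]
  | cons w ws ih =>
      intro l hnd hcov
      have hnd' : ws.Nodup := (List.nodup_cons.mp hnd).2
      have hwni : w ∉ ws := (List.nodup_cons.mp hnd).1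
      have hstep : ∀ w' ∈ ws,
          l.filter (fun a => key a == w')
            = (l.filter (fun a => !(key a == w))).filter (fun a => key a == w') := by
        intro w' hw'
        rw [List.filter_filter]
        apply List.filter_congr
        intro a _
        by_cases h : key a = w'
        · have hne : ¬ w' = w := by
            rintro rfl
            exact hwni hw'
          simp [h, hne]
        · simp [h]
      have hcov' : ∀ a ∈ l.filter (fun a => !(key a == w)), key a ∈ ws := by
        intro a ha
        rcases List.mem_filter.mp ha with ⟨hal, hne⟩
        have := hcov a hal
        simp only [Bool.not_eq_true', beq_eq_false_iff_ne, ne_eq] at hne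
        simpa [hne] using this
      have e2 : ws.flatMap (fun w' => l.filter (fun a => key a == w'))
          = ws.flatMap (fun w' => (l.filter (fun a => !(key a == w))).filter (fun a => key a == w')) :=
        List.flatMap_congr hstep
      have p1 : (ws.flatMap (fun w' => (l.filter (fun a => !(key a == w))).filter
            (fun a => key a == w'))).Perm (l.filter (fun a => !(key a == w))) :=
        ih _ hnd' hcov'
      have : ((w :: ws).flatMap (fun w' => l.filter (fun a => key a == w')))
          = l.filter (fun a => key a == w)
            ++ ws.flatMap (fun w' => l.filter (fun a => key a == w')) := by
        simp [List.flatMap_cons]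
      rw [this, e2]
      exact (p1.append_left _).trans (List.filter_append_perm _ l)

-- A's loop equals pvRanked
lemma pv_rankedA (aset qset : PySem.Set String) (sug : List String) :
    (PySem.List.enumerate sug 0).foldl (fun ranked p =>
        let cleaned := PySem.Str.strip p.2
        let lowered := PySem.Str.lower cleaned
        if cleaned.toList = [] then ranked
        else
          let score : Int := 0
          let score := if aset.contains lowered then score + 5 else score
          let score := if qset.contains lowered then score + 3 else score
          let score := if !(PySem.Set.ofList (pvPOPULAR_SUBREDDITS.map PySem.Str.lower)).contains lowered then score + 1 else score
          let score := if PySem.Str.len cleaned ≤ 16 then score + 1 else score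
          ranked ++ [(score, p.1, cleaned)]) ([] : List (Int × Int × String))
      = pvRanked aset qset sug := by
  refine Eq.trans (PySem.List.foldl_congr_mem _ _
      (fun acc (p : Int × String) =>
        if ((PySem.Str.strip p.2).toList ≠ []) then acc ++ [pvTrip aset qset p] else acc)
      _ ?_) ?_
  · intro acc p _
    by_cases h : (PySem.Str.strip p.2).toList = []
    · simp [h]
    · simp only [h, if_false, ne_eq, not_false_iff, if_true]
      simp only [pvTrip, pvSc]
      split_ifs <;> norm_num
  · rw [PySem.List.foldl_append_ite]
    simp [pvRanked]

-- B's loop equals pvRanked projected to (score, name)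
lemma pv_scoredB (aset qset : PySem.Set String) (sug : List String) :
    sug.foldl (fun scored subreddit =>
        let cleaned := PySem.Str.strip subreddit
        if cleaned.toList = [] then scored
        else
          let lowered := PySem.Str.lower cleaned
          scored ++ [((if aset.contains lowered then (5 : Int) else 0)
                      + (if qset.contains lowered then (3 : Int) else 0)
                      + (if !(PySem.Set.ofList (pvPOPULAR_SUBREDDITS.map PySem.Str.lower)).contains lowered then (1 : Int) else 0)
                      + (if PySem.Str.len cleaned ≤ 16 then (1 : Int) else 0), cleaned)]) ([] : List (Int × String))
      = (pvRanked aset qset sug).map (fun t => (t.1, t.2.2)) := by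
  refine Eq.trans (PySem.List.foldl_congr_mem _ _
      (fun acc (s : String) =>
        if ((PySem.Str.strip s).toList ≠ []) then
          acc ++ [(pvSc aset qset (PySem.Str.strip s), PySem.Str.strip s)] else acc)
      _ ?_) ?_
  · intro acc s _
    by_cases h : (PySem.Str.strip s).toList = []
    · simp [h]
    · simp only [h, if_false, ne_eq, not_false_iff, if_true]
      rfl
  · rw [PySem.List.foldl_append_ite, List.nil_append]
    simp only [pvRanked, List.map_map]
    conv_lhs => rw [← PySem.List.map_snd_enumerate sug 0]
    rw [List.filter_map, List.map_map]
    rfl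

-- score bounds: every ranked entry scores in 0..10
lemma pv_scorebound (aset qset : PySem.Set String) (sug : List String) :
    ∀ t : Int × Int × String, t ∈ pvRanked aset qset sug → t.1 ∈ pvWs := by
  intro t ht
  rcases List.mem_map.mp ht with ⟨p, _, rfl⟩
  have h1 : 0 ≤ pvSc aset qset (PySem.Str.strip p.2) ∧
      pvSc aset qset (PySem.Str.strip p.2) ≤ 10 := by
    simp only [pvSc]; split_ifs <;> omega
  simp only [pvTrip, pvWs, List.mem_cons, List.not_mem_nil, or_false]
  omega

-- ranked indices are strictly increasing
lemma pv_idx_pairwise (aset qset : PySem.Set String) (sug : List String) :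
    (pvRanked aset qset sug).Pairwise (fun s t => s.2.1 < t.2.1) := by
  simp only [pvRanked]
  rw [List.pairwise_map]
  exact ((PySem.List.pairwise_lt_enumerate sug 0).filter _).imp (by
    intro a b h
    simpa [pvTrip] using h)

-- the sorted ranked list is the bucket concatenation, highest score first
lemma pv_sorted_eq_buckets (aset qset : PySem.Set String) (sug : List String) :
    PySem.List.sorted2 (pvRanked aset qset sug)
        (fun item => -item.1) (fun item => item.2.1) false
      = pvWs.flatMap (fun w => (pvRanked aset qset sug).filter (fun t => t.1 == w)) := by
  rw [pv_sorted2_eq_sorted_lex]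
  apply PySem.List.sorted_eq_of_perm_of_pairwise_lt
  · exact pv_perm_flatMap_filter (fun t : Int × Int × String => t.1) pvWs _ (by decide)
      (pv_scorebound aset qset sug)
  · rw [List.pairwise_flatMap]
    constructor
    · intro w _
      refine ((pv_idx_pairwise aset qset sug).filter _).imp_of_mem ?_
      intro a b ha hb hab
      have ha1 : a.1 = w := by simpa using (List.mem_filter.mp ha).2
      have hb1 : b.1 = w := by simpa using (List.mem_filter.mp hb).2
      show toLex (-a.1, a.2.1) < toLex (-b.1, b.2.1)
      rw [Prod.Lex.lt_iff]
      right
      refine ⟨by simp [ha1, hb1], ?_⟩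
      simpa [ofLex_toLex] using hab
    · have hws : pvWs.Pairwise (fun a b => b < a) := by decide
      refine hws.imp ?_
      intro w w' hlt x hx y hy
      have hx1 : x.1 = w := by simpa using (List.mem_filter.mp hx).2
      have hy1 : y.1 = w' := by simpa using (List.mem_filter.mp hy).2
      show toLex (-x.1, x.2.1) < toLex (-y.1, y.2.1)
      rw [Prod.Lex.lt_iff]
      left
      simp only [ofLex_toLex]
      omega

theorem select_soft_target_subreddits_py_spec_aux :
    ∀ (sug anch qt : List String) (limit : Int),
      select_soft_target_subreddits_py sug anch qt limit
        = select_soft_target_subreddits_py_alt sug anch qt limit := by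
  intro sug anch qt limit
  by_cases hs : sug = []
  · simp [select_soft_target_subreddits_py, select_soft_target_subreddits_py_alt, hs]
  simp only [select_soft_target_subreddits_py, select_soft_target_subreddits_py_alt, if_neg hs]
  rw [pv_rankedA, pv_scoredB, pv_sorted_eq_buckets]
  have hrange : PySem.List.pyRange 10 (-1) (-1) = pvWs := by decide
  rw [hrange, PySem.List.foldl_append_eq_flatMap, List.nil_append, pv_map_slice]
  congr 1
  rw [List.map_flatMap]
  apply List.flatMap_congr
  intro w _
  rw [List.filter_map, List.map_map]
  rfl

-- ===== VERDICT (by name: the statement is the Claim_ definition above) =====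
theorem select_soft_target_subreddits_py_spec : Claim_equal_select_soft_target_subreddits_py := by
  intro sug anch qt limit _
  exact select_soft_target_subreddits_py_spec_aux sug anch qt limit
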